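-- pv_equiv track=rewrite | github.com/robert-haas/unified-plotting | file_generators/generate_colors.py | replace_symbols
-- ===== SOURCE A (Python) =====
-- def replace_symbols(given):
--     replacement_table = [
--         ('/', '_'),
--         (':', '.'),
--         (':', '.'),
--         ('/', '_'),
--         (' ', '_'),
--         ("'", ''),
--     ]
--     for source, target in replacement_table:
--         given = given.replace(source, target)
--     return given
-- ===== SOURCE B (Python) =====
-- _MAPPING = {'/': '_', ':': '.', ' ': '_', "'": ''}
--
--
-- def replace_symbols(given):
--     return ''.join(_MAPPING.get(ch, ch) for ch in given)
-- ===== Notes on version B (the rewrite author's own statement) =====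
-- stated objective: simpler
-- what changed: Replaces six sequential full-string .replace scans with one character-level pass that looks each character up in a translation dict and joins the results.
import Mathlib
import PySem

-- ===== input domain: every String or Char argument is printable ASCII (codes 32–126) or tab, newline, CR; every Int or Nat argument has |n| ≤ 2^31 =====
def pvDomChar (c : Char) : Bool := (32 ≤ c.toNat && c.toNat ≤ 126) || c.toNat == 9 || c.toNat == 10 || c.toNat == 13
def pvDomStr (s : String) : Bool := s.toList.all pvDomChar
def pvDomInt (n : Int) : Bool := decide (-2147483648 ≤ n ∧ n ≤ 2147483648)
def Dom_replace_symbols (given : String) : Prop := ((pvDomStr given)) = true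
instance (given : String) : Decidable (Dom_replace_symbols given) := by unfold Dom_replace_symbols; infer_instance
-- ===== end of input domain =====

-- B replaces A's six sequential full-string .replace scans with a single character-level
-- pass using a translation dict (objective: simpler).

-- ===== PORT A =====
-- for source, target in replacement_table: given = given.replace(source, target)
def replace_symbols (given : String) : String :=
  let replacement_table : List (String × String) :=
    [("/", "_"), (":", "."), (":", "."), ("/", "_"), (" ", "_"), ("'", "")]
  replacement_table.foldl (fun g st => PySem.Str.replace g st.1 st.2) given

-- ===== PORT B =====
-- module-level translation dict {'/': '_', ':': '.', ' ': '_', "'": ''}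
def pvMapping : PySem.Dict Char String :=
  ((((PySem.Dict.empty).insert '/' "_").insert ':' ".").insert ' ' "_").insert '\'' ""

-- ''.join(_MAPPING.get(ch, ch) for ch in given)
def replace_symbols_alt (given : String) : String :=
  PySem.Str.join "" (given.toList.map (fun ch => (pvMapping.get? ch).getD (String.ofList [ch])))

-- ===== PRECONDITION & SPEC =====
def Spec_replace_symbols (given : String) (out : String) : Prop := out = replace_symbols_alt given
instance (given : String) (out : String) : Decidable (Spec_replace_symbols given out) := by unfold Spec_replace_symbols; infer_instance

-- ===== CLAIM (what is proved, stated in full; the proofs are below) =====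
def Claim_equal_replace_symbols : Prop := ∀ (given : String), Dom_replace_symbols given → Spec_replace_symbols given (replace_symbols given)

-- ===== LEMMAS AND PROOFS =====

-- replace.go with a single-character pattern is a flatMap, for sufficient fuel
theorem pv_go_single (a : Char) (new : List Char) :
    ∀ (l acc : List Char) (fuel : Nat), l.length ≤ fuel →
      PySem.Chars.replace.go [a] new fuel l acc
        = acc.reverse ++ l.flatMap (fun c => if c = a then new else [c]) := by
  intro l
  induction l with
  | nil =>
      intro acc fuel _
      cases fuel <;> simp [PySem.Chars.replace.go]
  | cons c t ih =>
      intro acc fuel hf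
      cases fuel with
      | zero => simp at hf
      | succ fuel =>
        rw [PySem.Chars.replace.go.eq_def]
        by_cases hc : c = a
        · subst hc
          have hpre : List.isPrefixOf [c] (c :: t) = true := by
            simp [List.isPrefixOf]
          simp only [hpre, if_pos, List.length_cons, List.length_nil,
            List.drop_succ_cons, List.drop_zero, List.flatMap_cons]
          rw [ih _ _ (by simpa using Nat.le_of_succ_le_succ hf)]
          simp
        · have hpre : List.isPrefixOf [a] (c :: t) = false := by
            simp [List.isPrefixOf]
            exact fun h => hc h.symm
          simp only [hpre, Bool.false_eq_true, if_neg, not_false_iff, List.flatMap_cons]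
          rw [ih _ _ (by simpa using Nat.le_of_succ_le_succ hf)]
          simp [hc]

-- single-character replace is a flatMap
theorem pv_replace_single (s : List Char) (a : Char) (new : List Char) :
    PySem.Chars.replace s [a] new = s.flatMap (fun c => if c = a then new else [c]) := by
  rw [PySem.Chars.replace]
  simp only [List.isEmpty_cons, Bool.false_eq_true, if_neg, not_false_iff]
  simpa using pv_go_single a new s [] s.length le_rfl

-- flatMaps compose
theorem pv_flatMap_flatMap {α : Type} (l : List α) (f g : α → List α) :
    (l.flatMap f).flatMap g = l.flatMap (fun c => (f c).flatMap g) := by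
  induction l with
  | nil => rfl
  | cons x xs ih => simp [List.flatMap_cons, ih]

-- join with empty separator is flatten
theorem pv_join_nil (l : List (List Char)) : PySem.Chars.join [] l = l.flatten := by
  induction l with
  | nil => rfl
  | cons x xs ih =>
      cases xs with
      | nil => simp [PySem.Chars.join, List.intercalate]
      | cons y ys =>
          simp only [PySem.Chars.join, List.intercalate] at *
          simp [List.intersperse, List.flatten] at *
          simp [ih]

theorem replace_symbols_eq (given : String) :
    replace_symbols given = replace_symbols_alt given := by
  unfold replace_symbols replace_symbols_alt
  apply congrArg String.ofList
  simp only [PySem.Str.replace, String.toList_ofList,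
    List.map_map]
  have e1 : ("/" : String).toList = ['/'] := rfl
  have e2 : (":" : String).toList = [':'] := rfl
  have e3 : (" " : String).toList = [' '] := rfl
  have e4 : ("'" : String).toList = ['\''] := rfl
  have e5 : ("_" : String).toList = ['_'] := rfl
  have e6 : ("." : String).toList = ['.'] := rfl
  have e7 : ("" : String).toList = [] := rfl
  rw [e1, e2, e3, e4, e5, e6, e7]
  rw [pv_replace_single, pv_replace_single, pv_replace_single, pv_replace_single,
    pv_replace_single, pv_replace_single]
  rw [pv_flatMap_flatMap, pv_flatMap_flatMap, pv_flatMap_flatMap, pv_flatMap_flatMap,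
    pv_flatMap_flatMap]
  rw [pv_join_nil, List.flatten_eq_flatMap, List.flatMap_map]
  apply List.flatMap_congr
  intro c _
  by_cases h1 : c = '/'
  · subst h1; decide
  by_cases h2 : c = ':'
  · subst h2; decide
  by_cases h3 : c = ' '
  · subst h3; decide
  by_cases h4 : c = '\''
  · subst h4; decide
  have g1 : ('/' == c) = false := beq_eq_false_iff_ne.mpr (fun h => h1 h.symm)
  have g2 : (':' == c) = false := beq_eq_false_iff_ne.mpr (fun h => h2 h.symm)
  have g3 : (' ' == c) = false := beq_eq_false_iff_ne.mpr (fun h => h3 h.symm)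
  have g4 : ('\'' == c) = false := beq_eq_false_iff_ne.mpr (fun h => h4 h.symm)
  simp [h1, h2, h3, h4, pvMapping, PySem.Dict.get?, PySem.Dict.insert, PySem.Dict.empty,
    g1, g2, g3, g4]

-- ===== VERDICT (by name: the statement is the Claim_ definition above) =====
theorem replace_symbols_spec : Claim_equal_replace_symbols := by
  intro given _
  unfold Spec_replace_symbols
  exact replace_symbols_eq given
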